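-- pv_equiv track=rewrite | github.com/anptitd22/PYTHON-PTIT | CodePTIT/PY01043 - SỐ THUẬN NGHỊCH CHẴN.py | check
-- ===== SOURCE A (Python) =====
-- def check(n):
--     if len(n)%2==1: return False
--     l=0
--     r=len(n)-1
--     while l<r:
--         if n[l]!=n[r] or (ord(n[l])-ord('0'))%2!=0 or (ord(n[r])-ord('0'))%2!=0:
--             return False
--         l+=1
--         r-=1
--     return True
-- ===== SOURCE B (Python) =====
-- def check(n):
--     if len(n)%2==1: return False
--     return n == n[::-1] and all((ord(c)-ord('0'))%2==0 for c in n)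
-- ===== Notes on version B (the rewrite author's own statement) =====
-- stated objective: simpler
-- what changed: Replaces the two-pointer while loop by two separate whole-string passes: a palindrome test via string reversal and an all-even parity pass (same ord-based parity expression, so non-digit characters behave identically).
import Mathlib
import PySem

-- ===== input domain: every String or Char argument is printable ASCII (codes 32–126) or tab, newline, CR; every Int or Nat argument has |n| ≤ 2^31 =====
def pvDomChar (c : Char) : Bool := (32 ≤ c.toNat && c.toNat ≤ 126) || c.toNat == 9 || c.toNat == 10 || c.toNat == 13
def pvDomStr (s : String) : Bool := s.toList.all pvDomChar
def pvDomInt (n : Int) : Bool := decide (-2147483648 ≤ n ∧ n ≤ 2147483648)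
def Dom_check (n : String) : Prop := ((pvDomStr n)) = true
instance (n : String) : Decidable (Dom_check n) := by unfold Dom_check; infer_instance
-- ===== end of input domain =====

-- B is simpler: two separate whole-string passes (reversal palindrome test + all-even parity
-- pass with the same ord-based expression) instead of A's combined two-pointer loop.

-- (ord(c) - ord('0')) % 2 == 0, exactly as both Pythons write it
def pvEvenOrd (c : Char) : Bool := PySem.Int.mod ((c.toNat : Int) - 48) 2 == 0

-- ===== PORT A =====
def checkGo (cs : List Char) (l r : Int) : Bool :=
  if _h : l < r then
    match PySem.List.pyGet? cs l, PySem.List.pyGet? cs r with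
    | some a, some b =>
        if a != b || !pvEvenOrd a || !pvEvenOrd b then false
        else checkGo cs (l + 1) (r - 1)
    | _, _ => false   -- IndexError branch; unreachable since 0 ≤ l < r ≤ len-1 throughout
  else true
  termination_by (r - l).toNat
  decreasing_by omega

def check (n : String) : Bool :=
  let cs := n.toList
  if PySem.Int.mod (cs.length : Int) 2 == 1 then false
  else checkGo cs 0 ((cs.length : Int) - 1)

-- ===== PORT B =====
def check_alt (n : String) : Bool :=
  let cs := n.toList
  if PySem.Int.mod (cs.length : Int) 2 == 1 then false
  else (cs == cs.reverse) && cs.all pvEvenOrd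

-- ===== PRECONDITION & SPEC =====
def Spec_check (n : String) (out : Bool) : Prop := out = check_alt n
instance (n : String) (out : Bool) : Decidable (Spec_check n out) := by unfold Spec_check; infer_instance

-- ===== CLAIM (what is proved, stated in full; the proofs are below) =====
def Claim_equal_check : Prop := ∀ (n : String), Dom_check n → Spec_check n (check n)

-- ===== LEMMAS AND PROOFS =====

-- helper: a nonempty list is mid ++ [last]
theorem pvEqAppendSingleton {α : Type} {ys : List α} (h : ys ≠ []) :
    ∃ (mid : List α) (b : α), ys = mid ++ [b] := by
  induction ys with
  | nil => exact absurd rfl h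
  | cons y ys ih =>
    cases ys with
    | nil => exact ⟨[], y, rfl⟩
    | cons z zs =>
      obtain ⟨mid, b, hmb⟩ := ih (by simp)
      exact ⟨y :: mid, b, by rw [hmb]; rfl⟩

-- one unfolding step of A's loop when both lookups succeed
theorem checkGo_step (cs : List Char) (l r : Int) (x y : Char) (h : l < r)
    (hx : PySem.List.pyGet? cs l = some x) (hy : PySem.List.pyGet? cs r = some y) :
    checkGo cs l r
      = if (x != y || !pvEvenOrd x || !pvEvenOrd y) then false else checkGo cs (l + 1) (r - 1) := by
  rw [checkGo, dif_pos h, hx, hy]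

-- one unfolding step when a lookup fails
theorem checkGo_none (cs : List Char) (l r : Int) (h : l < r)
    (hn : PySem.List.pyGet? cs l = none ∨ PySem.List.pyGet? cs r = none) :
    checkGo cs l r = false := by
  rw [checkGo, dif_pos h]
  cases hx : PySem.List.pyGet? cs l <;> cases hy : PySem.List.pyGet? cs r <;>
    first | rfl | simp_all

-- shifting the window past a head element
theorem checkGo_cons (a : Char) (xs : List Char) (l r : Int) (hl : 0 ≤ l) :
    checkGo (a :: xs) (l + 1) (r + 1) = checkGo xs l r := by
  by_cases h : l < r
  · have h1 : PySem.List.pyGet? (a :: xs) (l + 1) = PySem.List.pyGet? xs l := by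
      obtain ⟨m, rfl⟩ := Int.eq_ofNat_of_zero_le hl
      exact PySem.List.pyGet?_cons_succ a xs m
    have h2 : PySem.List.pyGet? (a :: xs) (r + 1) = PySem.List.pyGet? xs r := by
      have hr : 0 ≤ r := le_of_lt (lt_of_le_of_lt hl h)
      obtain ⟨m, rfl⟩ := Int.eq_ofNat_of_zero_le hr
      exact PySem.List.pyGet?_cons_succ a xs m
    cases hx : PySem.List.pyGet? xs l with
    | none =>
      rw [checkGo_none _ _ _ (by omega) (Or.inl (h1.trans hx)),
          checkGo_none _ _ _ h (Or.inl hx)]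
    | some x =>
      cases hy : PySem.List.pyGet? xs r with
      | none =>
        rw [checkGo_none _ _ _ (by omega) (Or.inr (h2.trans hy)),
            checkGo_none _ _ _ h (Or.inr hy)]
      | some y =>
        rw [checkGo_step (a :: xs) (l + 1) (r + 1) x y (by omega) (h1.trans hx) (h2.trans hy),
            checkGo_step xs l r x y h hx hy]
        split
        · rfl
        · rw [show l + 1 + 1 = (l + 1) + 1 by ring, show r + 1 - 1 = (r - 1) + 1 by ring]
          exact checkGo_cons a xs (l + 1) (r - 1) (by omega)
  · rw [checkGo, dif_neg (show ¬ (l + 1 < r + 1) by omega), checkGo, dif_neg h]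
  termination_by (r - l).toNat
  decreasing_by omega

-- dropping an unreached trailing element
theorem checkGo_append (xs : List Char) (b : Char) (l r : Int) (hl : 0 ≤ l)
    (hr : r < (xs.length : Int)) :
    checkGo (xs ++ [b]) l r = checkGo xs l r := by
  by_cases h : l < r
  · have hget : ∀ i : Int, 0 ≤ i → i < (xs.length : Int) →
        PySem.List.pyGet? (xs ++ [b]) i = PySem.List.pyGet? xs i := by
      intro i h0 hi
      rw [PySem.List.pyGet?_of_nonneg (xs := xs ++ [b]) h0,
          PySem.List.pyGet?_of_nonneg (xs := xs) h0]
      rw [List.getElem?_append_left (by omega)]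
    have h1 := hget l hl (lt_trans h hr)
    have h2 := hget r (le_of_lt (lt_of_le_of_lt hl h)) hr
    cases hx : PySem.List.pyGet? xs l with
    | none =>
      rw [checkGo_none _ _ _ h (Or.inl (h1.trans hx)), checkGo_none _ _ _ h (Or.inl hx)]
    | some x =>
      cases hy : PySem.List.pyGet? xs r with
      | none =>
        rw [checkGo_none _ _ _ h (Or.inr (h2.trans hy)), checkGo_none _ _ _ h (Or.inr hy)]
      | some y =>
        rw [checkGo_step (xs ++ [b]) l r x y h (h1.trans hx) (h2.trans hy),
            checkGo_step xs l r x y h hx hy]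
        split
        · rfl
        · exact checkGo_append xs b (l + 1) (r - 1) (by omega) (by omega)
  · rw [checkGo, dif_neg h, checkGo, dif_neg h]
  termination_by (r - l).toNat
  decreasing_by omega

-- A's loop on a :: (mid ++ [b]) peels one step
theorem checkGo_peel (a b : Char) (mid : List Char) :
    checkGo (a :: (mid ++ [b])) 0 (((a :: (mid ++ [b])).length : Int) - 1)
      = ((a == b) && pvEvenOrd a && pvEvenOrd b
          && checkGo mid 0 ((mid.length : Int) - 1)) := by
  have hlen : ((a :: (mid ++ [b])).length : Int) - 1 = (mid.length : Int) + 1 := by simp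
  have hlt : (0 : Int) < (mid.length : Int) + 1 := by positivity
  have hA : PySem.List.pyGet? (a :: (mid ++ [b])) 0 = some a := PySem.List.pyGet?_zero_cons a _
  have hB : PySem.List.pyGet? (a :: (mid ++ [b])) ((mid.length : Int) + 1) = some b := by
    have e : (a :: (mid ++ [b]) : List Char) = (a :: mid) ++ [b] := rfl
    rw [e, show ((mid.length : Int) + 1) = (((a :: mid).length : Nat) : Int) by push_cast [List.length_cons]; ring]
    first
      | exact PySem.List.pyGet?_append_length (a :: mid) [] b
      | exact PySem.List.pyGet?_append_length (a :: mid) b []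
      | exact PySem.List.pyGet?_append_length (pre := a :: mid) (y := b) (ys := [])
  rw [hlen, checkGo_step _ _ _ a b hlt hA hB]
  have hrec : checkGo (a :: (mid ++ [b])) (0 + 1) ((mid.length : Int) + 1 - 1)
      = checkGo mid 0 ((mid.length : Int) - 1) := by
    rw [show ((mid.length : Int) + 1 - 1) = ((mid.length : Int) - 1) + 1 by ring]
    rw [checkGo_cons a (mid ++ [b]) 0 ((mid.length : Int) - 1) le_rfl]
    exact checkGo_append mid b 0 ((mid.length : Int) - 1) le_rfl (by omega)
  rw [hrec]
  cases hab : a == b <;> cases he1 : pvEvenOrd a <;> cases he2 : pvEvenOrd b <;>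
    simp [bne, hab]

-- B's two passes on a :: (mid ++ [b]) peel the same way
theorem alt_peel (a b : Char) (mid : List Char) :
    (((a :: (mid ++ [b]) : List Char) == (a :: (mid ++ [b])).reverse)
        && (a :: (mid ++ [b])).all pvEvenOrd)
      = ((a == b) && pvEvenOrd a && pvEvenOrd b
          && ((mid == mid.reverse) && mid.all pvEvenOrd)) := by
  have hrev : (a :: (mid ++ [b]) : List Char).reverse = b :: (mid.reverse ++ [a]) := by
    simp
  have key : ((a :: (mid ++ [b]) : List Char) = b :: (mid.reverse ++ [a]))
      ↔ (a = b ∧ mid = mid.reverse) := by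
    constructor
    · intro h
      have h1 : a = b := by injection h
      have h2 : mid ++ [b] = mid.reverse ++ [a] := by injection h
      exact ⟨h1, List.append_inj_left h2 (by simp)⟩
    · rintro ⟨rfl, hm⟩
      simp [← hm]
  rw [hrev, Bool.eq_iff_iff]
  simp only [Bool.and_eq_true, beq_iff_eq, List.all_cons, List.all_append, List.all_nil,
    Bool.and_true, key]
  tauto

-- main induction: on even-length lists the two computations agree
theorem main_even : ∀ (k : Nat) (cs : List Char), cs.length ≤ k → cs.length % 2 = 0 →
    checkGo cs 0 ((cs.length : Int) - 1) = ((cs == cs.reverse) && cs.all pvEvenOrd) := by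
  intro k
  induction k with
  | zero =>
    intro cs hle _
    have : cs = [] := List.eq_nil_of_length_eq_zero (by omega)
    subst this
    rw [checkGo]; simp
  | succ k ih =>
    intro cs hle hpar
    match cs with
    | [] => rw [checkGo]; simp
    | a :: ys =>
      have hys : ys ≠ [] := by
        intro h; subst h; simp at hpar
      obtain ⟨mid, b, rfl⟩ := pvEqAppendSingleton hys
      rw [checkGo_peel, alt_peel]
      have hmid : mid.length % 2 = 0 := by
        have : (a :: (mid ++ [b])).length = mid.length + 2 := by simp
        omega
      have hmle : mid.length ≤ k := by
        have : (a :: (mid ++ [b])).length = mid.length + 2 := by simp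
        omega
      rw [ih mid hmle hmid]

-- ===== VERDICT (by name: the statement is the Claim_ definition above) =====
theorem check_spec : Claim_equal_check := by
  intro n _
  unfold Spec_check check check_alt
  set cs := n.toList with hcs
  by_cases h : PySem.Int.mod (cs.length : Int) 2 == 1
  · simp only [h, if_true]
  · simp only [h]
    have hm : PySem.Int.mod (cs.length : Int) 2 = ((cs.length % 2 : Nat) : Int) := by
      simpa using PySem.Int.mod_natCast cs.length 2
    have hpar : cs.length % 2 = 0 := by
      rw [hm] at h
      simp only [beq_iff_eq] at h
      omega
    exact main_even cs.length cs le_rfl hpar
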